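-- pv_equiv track=rewrite | github.com/Dixith-ai/Learning-Python | _staging/advanced/find_all_combinations.py | find_combinations_with_count
-- ===== SOURCE A (Python) =====
-- def find_combinations_with_count(arr, k):
--     def backtrack(start, current):
--         if len(current) == k:
--             result.append(current[:])
--             return
--
--         for i in range(start, len(arr)):
--             current.append(arr[i])
--             backtrack(i + 1, current)
--             current.pop()
--
--     result = []
--     backtrack(0, [])
--     return result, len(result)
-- ===== SOURCE B (Python) =====
-- def find_combinations_with_count(arr, k):
--     def combs(items, n):
--         if n == 0:
--             return [[]]
--         if n < 0 or not items:
--             return []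
--         head, rest = items[0], items[1:]
--         return [[head] + c for c in combs(rest, n - 1)] + combs(rest, n)
--
--     result = combs(list(arr), k)
--     return result, len(result)
-- ===== Notes on version B (the rewrite author's own statement) =====
-- stated objective: alternative
-- what changed: Replaces index-based backtracking with a shared mutable accumulator by a pure structural recursion on the list (take-head / skip-head) that builds each combination list directly.
import Mathlib
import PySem

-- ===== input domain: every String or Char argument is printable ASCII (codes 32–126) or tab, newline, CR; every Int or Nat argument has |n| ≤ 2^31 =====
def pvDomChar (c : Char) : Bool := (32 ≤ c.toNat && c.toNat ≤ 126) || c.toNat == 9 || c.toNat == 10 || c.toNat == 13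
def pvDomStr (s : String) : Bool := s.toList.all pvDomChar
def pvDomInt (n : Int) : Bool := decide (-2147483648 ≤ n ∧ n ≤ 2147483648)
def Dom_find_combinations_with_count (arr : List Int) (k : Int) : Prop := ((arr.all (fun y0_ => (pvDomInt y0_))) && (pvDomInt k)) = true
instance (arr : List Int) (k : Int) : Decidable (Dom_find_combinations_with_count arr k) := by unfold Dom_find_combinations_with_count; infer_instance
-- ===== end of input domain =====

-- B replaces the mutable backtracking of A by a pure take-head/skip-head recursion on the list
-- (alternative decomposition, same asymptotic cost); return values proved equal on all inputs.


-- ===== PORT A =====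
-- backtrack(start, current): appends current when len(current)==k, else loops i in range(start, len(arr))
-- recursing with current+[arr[i]]; the mutable result/pop is modelled by returning the appended lists.
mutual
def pvBtA (arr : List Int) (k : Int) (start : Nat) (current : List Int) : List (List Int) :=
  if (current.length : Int) = k then [current]
  else pvBtLoop arr k start current
termination_by 2 * (arr.length - start) + 2
decreasing_by simp_wf
def pvBtLoop (arr : List Int) (k : Int) (i : Nat) (current : List Int) : List (List Int) :=
  if h : i < arr.length then
    pvBtA arr k (i + 1) (current ++ [arr[i]]) ++ pvBtLoop arr k (i + 1) current
  else []
termination_by 2 * (arr.length - i) + 1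
decreasing_by all_goals (simp_wf; omega)
end

def find_combinations_with_count (arr : List Int) (k : Int) : List (List Int) × Int :=
  let result := pvBtA arr k 0 []
  (result, result.length)

-- ===== PORT B =====
-- combs(items, n) from Source B: pure recursion take-head / skip-head.
def pvCombs (items : List Int) (n : Int) : List (List Int) :=
  if n = 0 then [[]]
  else if n < 0 ∨ items = [] then []
  else
    match items with
    | [] => []
    | head :: rest => ((pvCombs rest (n - 1)).map (fun c => head :: c)) ++ pvCombs rest n

def find_combinations_with_count_alt (arr : List Int) (k : Int) : List (List Int) × Int :=
  let result := pvCombs arr k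
  (result, result.length)

-- ===== PRECONDITION & SPEC =====
def Spec_find_combinations_with_count (arr : List Int) (k : Int) (out : List (List Int) × Int) : Prop := out = find_combinations_with_count_alt arr k
instance (arr : List Int) (k : Int) (out : List (List Int) × Int) : Decidable (Spec_find_combinations_with_count arr k out) := by unfold Spec_find_combinations_with_count; infer_instance

-- ===== CLAIM (what is proved, stated in full; the proofs are below) =====
def Claim_equal_find_combinations_with_count : Prop := ∀ (arr : List Int) (k : Int), Dom_find_combinations_with_count arr k → Spec_find_combinations_with_count arr k (find_combinations_with_count arr k)

-- ===== LEMMAS AND PROOFS =====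
theorem pvCombs_neg (items : List Int) (n : Int) (hn : n < 0) : pvCombs items n = [] := by
  unfold pvCombs
  rw [if_neg (by omega), if_pos (Or.inl hn)]

-- Main invariant: the backtracking from index i with accumulator `current` produces exactly
-- the combinations of the remaining suffix, each prefixed by `current`; the loop does the same
-- provided len(current) ≠ k (the only situation in which the loop is entered).
theorem pvBt_eq (arr : List Int) (k : Int) :
    ∀ d i current, arr.length - i ≤ d →
      (pvBtA arr k i current
          = (pvCombs (arr.drop i) (k - current.length)).map (fun c => current ++ c)) ∧
      ((current.length : Int) ≠ k →
        pvBtLoop arr k i current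
          = (pvCombs (arr.drop i) (k - current.length)).map (fun c => current ++ c)) := by
  intro d
  induction d with
  | zero =>
      intro i current h
      have hi : arr.length ≤ i := by omega
      have hdrop : arr.drop i = [] := List.drop_eq_nil_of_le hi
      have hloop : pvBtLoop arr k i current = [] := by
        unfold pvBtLoop; rw [dif_neg (by omega)]
      constructor
      · unfold pvBtA
        by_cases hk : (current.length : Int) = k
        · rw [if_pos hk, hdrop]
          have : k - (current.length : Int) = 0 := by omega
          rw [this]
          unfold pvCombs
          simp
        · rw [if_neg hk, hloop, hdrop]
          unfold pvCombs
          rw [if_neg (by omega), if_pos (Or.inr rfl)]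
          simp
      · intro hk
        rw [hloop, hdrop]
        unfold pvCombs
        rw [if_neg (by omega), if_pos (Or.inr rfl)]
        simp
  | succ d ih =>
      intro i current h
      have loopEq : (current.length : Int) ≠ k →
          pvBtLoop arr k i current
            = (pvCombs (arr.drop i) (k - current.length)).map (fun c => current ++ c) := by
        intro hk
        by_cases hi : i < arr.length
        · have hdrop : arr.drop i = arr[i] :: arr.drop (i + 1) :=
            List.drop_eq_getElem_cons hi
          have hA := (ih (i + 1) (current ++ [arr[i]]) (by omega)).1
          have hL := (ih (i + 1) current (by omega)).2 hk
          unfold pvBtLoop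
          rw [dif_pos hi, hA, hL, hdrop]
          have hlen : ((current ++ [arr[i]]).length : Int) = (current.length : Int) + 1 := by
            simp
          by_cases hneg : k - (current.length : Int) < 0
          · rw [pvCombs_neg _ _ hneg, pvCombs_neg _ _ (by omega),
                pvCombs_neg _ _ (by omega)]
            simp
          · -- n := k - current.length is > 0 here (≠ 0 and not < 0)
            have hn : 0 < k - (current.length : Int) := by
              omega
            conv_rhs => rw [pvCombs]
            rw [if_neg (by omega),
                if_neg (fun hc => hc.elim (by omega) (List.cons_ne_nil _ _))]
            simp only [hlen, List.map_append, List.map_map]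
            have harg : k - ((current.length : Int) + 1) = k - (current.length : Int) - 1 := by
              ring
            rw [harg]
            congr 1
            simp [Function.comp_def, List.append_assoc]
        · have hdrop : arr.drop i = [] := List.drop_eq_nil_of_le (by omega)
          unfold pvBtLoop
          rw [dif_neg hi, hdrop]
          unfold pvCombs
          rw [if_neg (by omega), if_pos (Or.inr rfl)]
          simp
      constructor
      · unfold pvBtA
        by_cases hk : (current.length : Int) = k
        · rw [if_pos hk]
          have : k - (current.length : Int) = 0 := by omega
          rw [this]
          unfold pvCombs
          simp
        · rw [if_neg hk]
          exact loopEq hk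
      · exact loopEq

-- ===== VERDICT (by name: the statement is the Claim_ definition above) =====
theorem find_combinations_with_count_spec : Claim_equal_find_combinations_with_count := by
  intro arr k _
  unfold Spec_find_combinations_with_count find_combinations_with_count find_combinations_with_count_alt
  have h := (pvBt_eq arr k arr.length 0 [] (by omega)).1
  simp only [List.drop_zero, List.length_nil, Nat.cast_zero, Int.sub_zero] at h
  simp [h]
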